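-- pv_equiv track=rewrite | github.com/boolsi/boolsi | boolsi/model.py | simulate_n_steps
-- ===== SOURCE A (Python) =====
-- def apply_update_rules(state, predecessor_node_lists, truth_tables):
--     """
--     Update network state according to the update rule.
--
--     :param state: current network state
--     :param predecessor_node_lists: list of predecessor node lists
--     :param truth_tables: list of dicts (key: tuple of predecessor node
--         states, value: resulting node state)
--     :return: next network state
--     """
--     return [truth_tables[node][tuple(state[predecessor_node]
--                                      for predecessor_node in predecessor_node_lists[node])]
--             for node in range(len(state))]
--
-- def simulate_step(current_state,
--                   predecessor_node_lists,
--                   truth_tables,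
--                   next_perturbed_nodes=dict()):
--     """
--     Update network state by one time step (execute update rule and
--     apply perturbations).
--
--     :param current_state: [list] state at current time t
--     :param predecessor_node_lists: [list] predecessor node lists
--     :param truth_tables: list of dicts (key: tuple of predecessor node states,
--         value: resulting node state)
--     :param next_perturbed_nodes: [dict] perturbations at t+1
--     :return: state at t+1
--     """
--
--     next_state = apply_update_rules(current_state, predecessor_node_lists, truth_tables)
--
--     for node, node_state in next_perturbed_nodes.items():
--         next_state[node] = node_state
--
--     return next_state
--
-- def simulate_n_steps(initial_state,
--                      perturbed_nodes_by_t,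
--                      predecessor_node_lists,
--                      truth_tables,
--                      n_steps):
--     """
--     Simulate network states for given number of time steps.
--
--     :param initial_state: initial network state
--     :param perturbed_nodes_by_t: perturbations
--     :param predecessor_node_lists: list of predecessor node lists
--     :param truth_tables: list of dicts (key: tuple of predecessor node states,
--         value: resulting node state)
--     :param n_steps: number of steps to simulate
--     :return: list of all simulated states
--     """
--
--     current_state = initial_state
--     states = [current_state]
--
--     for t in range(n_steps):
--         try:
--             next_perturbed_nodes = perturbed_nodes_by_t[t + 1]
--         except KeyError:
--             next_state = simulate_step(current_state, predecessor_node_lists, truth_tables)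
--         else:
--             next_state = simulate_step(current_state, predecessor_node_lists, truth_tables,
--                                        next_perturbed_nodes=next_perturbed_nodes)
--         states.append(next_state)
--         current_state = next_state
--
--     return states
-- ===== SOURCE B (Python) =====
-- def simulate_n_steps(initial_state,
--                      perturbed_nodes_by_t,
--                      predecessor_node_lists,
--                      truth_tables,
--                      n_steps):
--     """Cycle-accelerated simulation: once past the last perturbation time the
--     dynamics is an autonomous map, so states already visited are memoized and,
--     on the first repeat, the remaining trajectory is copied out of the detected
--     cycle instead of being recomputed node by node."""
--     def step(state, t):
--         pert = perturbed_nodes_by_t.get(t, {})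
--         return [pert.get(node,
--                          truth_tables[node][tuple(state[p]
--                                                   for p in predecessor_node_lists[node])])
--                 for node in range(len(state))]
--
--     last_pert = max(perturbed_nodes_by_t, default=0)
--     states = [initial_state]
--     seen = {}
--     t = 0
--     while t < n_steps:
--         key = tuple(states[-1])
--         if t + 1 > last_pert:
--             if key in seen:
--                 start = seen[key]
--                 period = t - start
--                 for i in range(n_steps - t):
--                     states.append(states[start + 1 + i % period])
--                 return states
--             seen[key] = t
--         states.append(step(states[-1], t + 1))
--         t += 1
--     return states
-- ===== Notes on version B (the rewrite author's own statement) =====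
-- stated objective: alternative
-- what changed: B memoizes visited states once past the last perturbation time and, on the first repeated state, copies the rest of the trajectory out of the detected cycle (index arithmetic with i % period) instead of recomputing every step through the truth tables as A does.
-- outside the precondition, e.g. on simulate_n_steps([0], {1: {-1: 0}}, [[0]], [{(0,): 1, (1,): 0}], 1): A returns [[0], [0]], B returns [[0], [1]]
import Mathlib
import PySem

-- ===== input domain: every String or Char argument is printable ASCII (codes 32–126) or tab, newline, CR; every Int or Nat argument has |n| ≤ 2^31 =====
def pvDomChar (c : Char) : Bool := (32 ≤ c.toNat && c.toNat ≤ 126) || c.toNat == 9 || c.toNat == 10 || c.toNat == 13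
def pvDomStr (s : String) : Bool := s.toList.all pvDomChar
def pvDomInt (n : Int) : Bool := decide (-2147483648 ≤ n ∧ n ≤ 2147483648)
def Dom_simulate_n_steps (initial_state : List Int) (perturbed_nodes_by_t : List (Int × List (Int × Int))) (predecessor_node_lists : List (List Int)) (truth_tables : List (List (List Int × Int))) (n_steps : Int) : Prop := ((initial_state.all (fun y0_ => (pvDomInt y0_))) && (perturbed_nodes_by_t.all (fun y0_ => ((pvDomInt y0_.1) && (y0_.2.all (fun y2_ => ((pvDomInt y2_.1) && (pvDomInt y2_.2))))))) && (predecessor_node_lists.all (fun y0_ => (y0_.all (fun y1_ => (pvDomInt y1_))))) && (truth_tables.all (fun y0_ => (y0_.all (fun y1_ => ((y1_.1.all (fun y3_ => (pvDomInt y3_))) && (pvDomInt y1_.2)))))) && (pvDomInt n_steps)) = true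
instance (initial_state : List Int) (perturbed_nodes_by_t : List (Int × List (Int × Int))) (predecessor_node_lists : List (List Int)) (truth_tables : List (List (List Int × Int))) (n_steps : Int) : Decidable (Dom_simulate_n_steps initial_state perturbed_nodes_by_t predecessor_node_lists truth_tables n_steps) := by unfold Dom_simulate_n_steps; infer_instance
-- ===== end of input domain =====

-- B replaces A's step-by-step recomputation by a cycle-accelerated simulation: past the last
-- perturbation time the dynamics is autonomous, so visited states are memoized and on the first
-- repeat the rest of the trajectory is copied from the detected cycle; objective: alternative.

-- first-match lookup in an association list = Python dict lookup (dict keys are unique)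
def pvLookup {κ ν : Type} [DecidableEq κ] (l : List (κ × ν)) (k : κ) : Option ν :=
  match l with
  | [] => none
  | (a, b) :: r => if a = k then some b else pvLookup r k

-- ===== PORT A =====
def pvApplyUpdateRules (state : List Int) (predecessor_node_lists : List (List Int)) (truth_tables : List (List (List Int × Int))) : List Int :=
  (List.range state.length).map (fun node =>
    (pvLookup (truth_tables.getD node [])
      ((predecessor_node_lists.getD node []).map (fun p => PySem.List.pyGetD state p 0))).getD 0)

def pvSimulateStep (current_state : List Int) (predecessor_node_lists : List (List Int)) (truth_tables : List (List (List Int × Int))) (next_perturbed_nodes : List (Int × Int)) : List Int :=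
  next_perturbed_nodes.foldl (fun ns nv => PySem.List.pySetD ns nv.1 nv.2)
    (pvApplyUpdateRules current_state predecessor_node_lists truth_tables)

def simulate_n_steps (initial_state : List Int) (perturbed_nodes_by_t : List (Int × List (Int × Int))) (predecessor_node_lists : List (List Int)) (truth_tables : List (List (List Int × Int))) (n_steps : Int) : List (List Int) :=
  ((PySem.List.pyRange 0 n_steps 1).foldl
    (fun (acc : List (List Int) × List Int) t =>
      let next := match pvLookup perturbed_nodes_by_t (t + 1) with
        | none => pvSimulateStep acc.2 predecessor_node_lists truth_tables []
        | some d => pvSimulateStep acc.2 predecessor_node_lists truth_tables d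
      (acc.1 ++ [next], next))
    ([initial_state], initial_state)).1

-- ===== PORT B =====
-- Source B's inner `step(state, t)`: perturbation dict looked up at t, each node picked via pert.get
def pvStepBt (perturbed_nodes_by_t : List (Int × List (Int × Int))) (predecessor_node_lists : List (List Int)) (truth_tables : List (List (List Int × Int))) (t : Int) (state : List Int) : List Int :=
  let pert := (pvLookup perturbed_nodes_by_t t).getD []
  (List.range state.length).map (fun node : Nat =>
    (pvLookup pert (node : Int)).getD
      ((pvLookup (truth_tables.getD node [])
        ((predecessor_node_lists.getD node []).map (fun p => PySem.List.pyGetD state p 0))).getD 0))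

-- Source B's while loop; `seen[key] = t` is an append because the branch guarantees key ∉ seen
def pvWhileC (perturbed_nodes_by_t : List (Int × List (Int × Int))) (predecessor_node_lists : List (List Int)) (truth_tables : List (List (List Int × Int))) (n_steps last_pert : Int) (states : List (List Int)) (seen : List (List Int × Int)) (t : Int) : List (List Int) :=
  if h : t < n_steps then
    let key := PySem.List.pyGetD states (-1) []
    if last_pert < t + 1 then
      match pvLookup seen key with
      | some start =>
        (PySem.List.pyRange 0 (n_steps - t) 1).foldl
          (fun st i => st ++ [PySem.List.pyGetD st (start + 1 + PySem.Int.mod i (t - start)) []]) states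
      | none =>
        pvWhileC perturbed_nodes_by_t predecessor_node_lists truth_tables n_steps last_pert
          (states ++ [pvStepBt perturbed_nodes_by_t predecessor_node_lists truth_tables (t + 1) key])
          (seen ++ [(key, t)]) (t + 1)
    else
      pvWhileC perturbed_nodes_by_t predecessor_node_lists truth_tables n_steps last_pert
        (states ++ [pvStepBt perturbed_nodes_by_t predecessor_node_lists truth_tables (t + 1) key])
        seen (t + 1)
  else states
termination_by (n_steps - t).toNat
decreasing_by all_goals omega

def simulate_n_steps_alt (initial_state : List Int) (perturbed_nodes_by_t : List (Int × List (Int × Int))) (predecessor_node_lists : List (List Int)) (truth_tables : List (List (List Int × Int))) (n_steps : Int) : List (List Int) :=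
  let last_pert := PySem.List.maxD (perturbed_nodes_by_t.map Prod.fst) (fun x => x) 0
  pvWhileC perturbed_nodes_by_t predecessor_node_lists truth_tables n_steps last_pert
    [initial_state] [] 0

-- ===== PRECONDITION & SPEC =====
-- all 0/1 vectors of length k (possible truth-table keys)
def pvBoolVecs : Nat → List (List Int)
  | 0 => [[]]
  | k + 1 => (pvBoolVecs k).flatMap (fun v => [0 :: v, 1 :: v])

-- Pre_ restricts to well-formed Boolean networks (one predecessor list and one complete 0/1 truth
-- table per node, in-range predecessor indices, 0/1 states and perturbation values, applied
-- perturbations keyed by distinct in-range node indices): outside it A can raise KeyError/IndexError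
-- or silently apply Python's negative-index wraparound on a perturbation write, and A may also happen
-- to return when a malformed table entry is never consulted — Pre_ is the natural domain, slightly
-- narrower than the set of inputs on which A returns (see cites).
def Pre_simulate_n_steps (initial_state : List Int) (perturbed_nodes_by_t : List (Int × List (Int × Int))) (predecessor_node_lists : List (List Int)) (truth_tables : List (List (List Int × Int))) (n_steps : Int) : Prop :=
  0 < n_steps →
    (predecessor_node_lists.length = initial_state.length ∧
     truth_tables.length = initial_state.length ∧
     (∀ l ∈ predecessor_node_lists, ∀ p ∈ l, 0 ≤ p ∧ p < (initial_state.length : Int)) ∧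
     (∀ x ∈ initial_state, x = 0 ∨ x = 1) ∧
     (∀ tb ∈ truth_tables, ∀ kv ∈ tb, kv.2 = 0 ∨ kv.2 = 1) ∧
     (∀ node ∈ List.range initial_state.length,
        ∀ key ∈ pvBoolVecs (predecessor_node_lists.getD node []).length,
          key ∈ (truth_tables.getD node []).map Prod.fst) ∧
     (∀ td ∈ perturbed_nodes_by_t, 1 ≤ td.1 → td.1 ≤ n_steps →
        ((td.2.map Prod.fst).Nodup ∧
         ∀ nv ∈ td.2, (0 ≤ nv.1 ∧ nv.1 < (initial_state.length : Int)) ∧ (nv.2 = 0 ∨ nv.2 = 1))))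
instance (initial_state : List Int) (perturbed_nodes_by_t : List (Int × List (Int × Int))) (predecessor_node_lists : List (List Int)) (truth_tables : List (List (List Int × Int))) (n_steps : Int) : Decidable (Pre_simulate_n_steps initial_state perturbed_nodes_by_t predecessor_node_lists truth_tables n_steps) := by unfold Pre_simulate_n_steps; infer_instance

def pvWitness_simulate_n_steps : List Int × (List (Int × List (Int × Int))) × List (List Int) × (List (List (List Int × Int))) × Int :=
  ([0], [(1, [(0, 1)])], [[0]], [[([0], 1), ([1], 0)]], 1)

def Spec_simulate_n_steps (initial_state : List Int) (perturbed_nodes_by_t : List (Int × List (Int × Int))) (predecessor_node_lists : List (List Int)) (truth_tables : List (List (List Int × Int))) (n_steps : Int) (out : List (List Int)) : Prop := out = simulate_n_steps_alt initial_state perturbed_nodes_by_t predecessor_node_lists truth_tables n_steps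
instance (initial_state : List Int) (perturbed_nodes_by_t : List (Int × List (Int × Int))) (predecessor_node_lists : List (List Int)) (truth_tables : List (List (List Int × Int))) (n_steps : Int) (out : List (List Int)) : Decidable (Spec_simulate_n_steps initial_state perturbed_nodes_by_t predecessor_node_lists truth_tables n_steps out) := by unfold Spec_simulate_n_steps; infer_instance

-- ===== CLAIM (what is proved, stated in full; the proofs are below) =====
def Claim_equal_simulate_n_steps : Prop := ∀ (initial_state : List Int) (perturbed_nodes_by_t : List (Int × List (Int × Int))) (predecessor_node_lists : List (List Int)) (truth_tables : List (List (List Int × Int))) (n_steps : Int), Dom_simulate_n_steps initial_state perturbed_nodes_by_t predecessor_node_lists truth_tables n_steps → Pre_simulate_n_steps initial_state perturbed_nodes_by_t predecessor_node_lists truth_tables n_steps → Spec_simulate_n_steps initial_state perturbed_nodes_by_t predecessor_node_lists truth_tables n_steps (simulate_n_steps initial_state perturbed_nodes_by_t predecessor_node_lists truth_tables n_steps)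

-- ===== LEMMAS AND PROOFS =====

-- proof-side: pvStepBt with the perturbation list made explicit
def pvStepB (pnl : List (List Int)) (tts : List (List (List Int × Int))) (pert : List (Int × Int)) (state : List Int) : List Int :=
  (List.range state.length).map (fun node : Nat =>
    (pvLookup pert (node : Int)).getD
      ((pvLookup (tts.getD node []) ((pnl.getD node []).map (fun p => PySem.List.pyGetD state p 0))).getD 0))

theorem pvStepBt_eq (pbt : List (Int × List (Int × Int))) (pnl : List (List Int)) (tts : List (List (List Int × Int))) (t : Int) (state : List Int) :
    pvStepBt pbt pnl tts t state = pvStepB pnl tts ((pvLookup pbt t).getD []) state := rfl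

-- the state after j steps, shared characterisation of both ports
def pvStateAt (pbt : List (Int × List (Int × Int))) (pnl : List (List Int)) (tts : List (List (List Int × Int))) (init : List Int) : Nat → List Int
  | 0 => init
  | j + 1 => pvStepBt pbt pnl tts ((j : Int) + 1) (pvStateAt pbt pnl tts init j)

theorem pvLookup_not_mem {κ ν : Type} [DecidableEq κ] (l : List (κ × ν)) (k : κ)
    (h : k ∉ l.map Prod.fst) : pvLookup l k = none := by
  induction l with
  | nil => rfl
  | cons ab r ih =>
    obtain ⟨a, b⟩ := ab
    simp only [List.map_cons, List.mem_cons, not_or] at h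
    simp only [pvLookup]
    rw [if_neg (fun hak => h.1 hak.symm)]
    exact ih h.2

theorem pvLookup_mem {κ ν : Type} [DecidableEq κ] (l : List (κ × ν)) (k : κ) (v : ν)
    (h : pvLookup l k = some v) : (k, v) ∈ l := by
  induction l with
  | nil => simp [pvLookup] at h
  | cons ab r ih =>
    obtain ⟨a, b⟩ := ab
    simp only [pvLookup] at h
    by_cases hak : a = k
    · rw [if_pos hak] at h
      cases h
      subst hak
      exact List.mem_cons_self
    · rw [if_neg hak] at h
      exact List.mem_cons_of_mem _ (ih h)

theorem pvSelfMap (base : List Int) :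
    (List.range base.length).map (fun i => base.getD i 0) = base := by
  apply List.ext_getElem
  · simp
  · intro i h1 h2
    simp only [List.length_map, List.length_range] at h1
    simp [List.getD_eq_getElem?_getD, List.getElem?_eq_getElem h1]

theorem pvSetFold (pert : List (Int × Int)) : ∀ (base : List Int),
    (pert.map Prod.fst).Nodup → (∀ nv ∈ pert, 0 ≤ nv.1 ∧ nv.1 < (base.length : Int)) →
    pert.foldl (fun ns nv => PySem.List.pySetD ns nv.1 nv.2) base
      = (List.range base.length).map (fun i : Nat => (pvLookup pert (i : Int)).getD (base.getD i 0)) := by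
  induction pert with
  | nil =>
    intro base _ _
    simp only [List.foldl_nil, pvLookup, Option.getD_none]
    exact (pvSelfMap base).symm
  | cons kv r ih =>
    intro base hnd hb
    obtain ⟨k, v⟩ := kv
    simp only [List.map_cons, List.nodup_cons] at hnd
    have hk := hb (k, v) (List.mem_cons_self)
    simp only [List.foldl_cons]
    have hlen : (PySem.List.pySetD base k v).length = base.length := by
      rw [PySem.List.pySetD_of_nonneg base v hk.1]; simp
    rw [ih (PySem.List.pySetD base k v) hnd.2
        (by intro nv hnv; rw [hlen]; exact hb nv (List.mem_cons_of_mem _ hnv))]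
    rw [hlen]
    apply List.map_congr_left
    intro i hi
    simp only [List.mem_range] at hi
    rw [PySem.List.pySetD_of_nonneg base v hk.1]
    by_cases hik : (i : Int) = k
    · rw [pvLookup_not_mem r (i : Int) (by rw [hik]; exact hnd.1)]
      simp only [pvLookup, Option.getD_none]
      rw [if_pos hik.symm]
      have hti : k.toNat = i := by omega
      rw [hti]
      simp [List.getD_eq_getElem?_getD, hi]
    · have hne : k.toNat ≠ i := by omega
      simp only [pvLookup]
      rw [if_neg (fun h => hik h.symm)]
      congr 1
      simp [List.getD_eq_getElem?_getD, List.getElem?_set_ne hne]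

theorem pvStepEq (cur : List Int) (pnl : List (List Int)) (tts : List (List (List Int × Int)))
    (pert : List (Int × Int)) (hnd : (pert.map Prod.fst).Nodup)
    (hb : ∀ nv ∈ pert, 0 ≤ nv.1 ∧ nv.1 < (cur.length : Int)) :
    pvSimulateStep cur pnl tts pert = pvStepB pnl tts pert cur := by
  unfold pvSimulateStep pvStepB
  have hlen : (pvApplyUpdateRules cur pnl tts).length = cur.length := by
    simp [pvApplyUpdateRules]
  rw [pvSetFold pert (pvApplyUpdateRules cur pnl tts) hnd (by rw [hlen]; exact hb)]
  rw [hlen]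
  apply List.map_congr_left
  intro i hi
  simp only [List.mem_range] at hi
  congr 1
  simp only [pvApplyUpdateRules]
  simp [List.getD_eq_getElem?_getD, hi]

theorem pvStepB_length (pnl : List (List Int)) (tts : List (List (List Int × Int)))
    (pert : List (Int × Int)) (state : List Int) :
    (pvStepB pnl tts pert state).length = state.length := by
  simp [pvStepB]

theorem pvStateAt_length (pbt : List (Int × List (Int × Int))) (pnl : List (List Int)) (tts : List (List (List Int × Int))) (init : List Int) (j : Nat) :
    (pvStateAt pbt pnl tts init j).length = init.length := by
  induction j with
  | zero => rfl
  | succ j ih => rw [pvStateAt, pvStepBt_eq, pvStepB_length, ih]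

-- A's fold equals the trajectory of pvStateAt
theorem pvFoldA (pbt : List (Int × List (Int × Int))) (pnl : List (List Int)) (tts : List (List (List Int × Int))) (init : List Int) (n_steps : Int)
    (P : ∀ td ∈ pbt, 1 ≤ td.1 → td.1 ≤ n_steps →
          ((td.2.map Prod.fst).Nodup ∧ ∀ nv ∈ td.2, 0 ≤ nv.1 ∧ nv.1 < (init.length : Int))) :
    ∀ (k : Nat) (t : Nat) (states : List (List Int)),
      (n_steps - (t : Int)).toNat = k →
      ((PySem.List.pyRange (t : Int) n_steps 1).foldl
        (fun (acc : List (List Int) × List Int) u =>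
          let next := match pvLookup pbt (u + 1) with
            | none => pvSimulateStep acc.2 pnl tts []
            | some d => pvSimulateStep acc.2 pnl tts d
          (acc.1 ++ [next], next))
        (states, pvStateAt pbt pnl tts init t)).1
      = states ++ (List.range k).map (fun i => pvStateAt pbt pnl tts init (t + 1 + i)) := by
  intro k
  induction k with
  | zero =>
    intro t states hk
    rw [PySem.List.pyRange_one_eq_nil (by omega)]
    simp
  | succ k ih =>
    intro t states hk
    rw [PySem.List.pyRange_one_cons (by omega)]
    simp only [List.foldl_cons]
    have hstep : (match pvLookup pbt ((t : Int) + 1) with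
        | none => pvSimulateStep (pvStateAt pbt pnl tts init t) pnl tts []
        | some d => pvSimulateStep (pvStateAt pbt pnl tts init t) pnl tts d)
        = pvStateAt pbt pnl tts init (t + 1) := by
      have hlen : (pvStateAt pbt pnl tts init t).length = init.length :=
        pvStateAt_length pbt pnl tts init t
      rcases hlk : pvLookup pbt ((t : Int) + 1) with _ | d
      · show pvSimulateStep (pvStateAt pbt pnl tts init t) pnl tts [] = _
        rw [pvStepEq _ pnl tts [] (by simp) (by simp), pvStateAt, pvStepBt_eq, hlk]
        rfl
      · show pvSimulateStep (pvStateAt pbt pnl tts init t) pnl tts d = _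
        have hmem := pvLookup_mem pbt ((t : Int) + 1) d hlk
        obtain ⟨hnd, hbnd⟩ := P ((t : Int) + 1, d) hmem (by omega) (by omega)
        rw [pvStepEq _ pnl tts d hnd (by rw [hlen]; exact hbnd), pvStateAt, pvStepBt_eq, hlk]
        rfl
    rw [hstep]
    have h2 := ih (t + 1) (states ++ [pvStateAt pbt pnl tts init (t + 1)]) (by push_cast; omega)
    have hcast : ((t : Int) + 1) = (((t + 1 : Nat)) : Int) := by push_cast; ring
    rw [hcast, h2, List.append_assoc]
    congr 1
    rw [List.range_succ_eq_map, List.map_cons, List.map_map]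
    simp only [List.singleton_append, Nat.add_zero]
    congr 1
    apply List.map_congr_left
    intro i _
    show pvStateAt pbt pnl tts init (t + 1 + 1 + i) = pvStateAt pbt pnl tts init (t + 1 + (i + 1))
    congr 1
    omega

-- unperturbed-step iteration past the last perturbation time
theorem pvIterU (pbt : List (Int × List (Int × Int))) (pnl : List (List Int)) (tts : List (List (List Int × Int))) (init : List Int) (last_pert : Int)
    (LP : ∀ u : Int, last_pert < u → pvLookup pbt u = none)
    (s : Nat) (hs : last_pert < (s : Int) + 1) :
    ∀ j : Nat, pvStateAt pbt pnl tts init (s + j)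
      = (pvStepB pnl tts [])^[j] (pvStateAt pbt pnl tts init s) := by
  intro j
  induction j with
  | zero => rfl
  | succ j ih =>
    have : s + (j + 1) = (s + j) + 1 := by omega
    rw [this, pvStateAt, pvStepBt_eq, LP (((s + j : Nat) : Int) + 1) (by push_cast; omega), ih,
      Function.iterate_succ_apply']
    rfl

theorem pvIterMod {α : Type} (f : α → α) (x : α) (p : Nat) (hp : 0 < p) (hx : f^[p] x = x) :
    ∀ j, f^[j] x = f^[j % p] x := by
  intro j
  induction j using Nat.strong_induction_on with
  | _ j ih =>
    by_cases hj : j < p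
    · rw [Nat.mod_eq_of_lt hj]
    · have hjp : p ≤ j := by omega
      have h2 : f^[j] x = f^[j - p] x := by
        conv_lhs => rw [show j = (j - p) + p by omega]
        rw [Function.iterate_add_apply, hx]
      rw [h2, ih (j - p) (by omega), Nat.mod_eq_sub_mod hjp]

theorem pvGetD_append_left (xs ys : List (List Int)) (j : Int) (h0 : 0 ≤ j)
    (h1 : j < (xs.length : Int)) :
    PySem.List.pyGetD (xs ++ ys) j [] = PySem.List.pyGetD xs j [] := by
  obtain ⟨n, rfl⟩ := Int.eq_ofNat_of_zero_le h0
  rw [PySem.List.pyGetD_natCast, PySem.List.pyGetD_natCast]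
  have hn : n < xs.length := by omega
  rw [List.getD_eq_getElem?_getD, List.getD_eq_getElem?_getD,
    List.getElem?_append_left hn]

-- the copy loop of the cycle shortcut never reads what it has appended
theorem pvFoldCopy (g : Int → Int) :
    ∀ (rng : List Int) (s0 : List (List Int)),
      (∀ i ∈ rng, 0 ≤ g i ∧ g i < (s0.length : Int)) →
      rng.foldl (fun st i => st ++ [PySem.List.pyGetD st (g i) []]) s0
        = s0 ++ rng.map (fun i => PySem.List.pyGetD s0 (g i) []) := by
  intro rng
  induction rng with
  | nil => intro s0 _; simp
  | cons a r ih =>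
    intro s0 hb
    simp only [List.foldl_cons, List.map_cons]
    have ha := hb a (List.mem_cons_self)
    rw [ih (s0 ++ [PySem.List.pyGetD s0 (g a) []])
        (by intro i hi
            have := hb i (List.mem_cons_of_mem _ hi)
            simp only [List.length_append, List.length_cons, List.length_nil]
            constructor
            · exact this.1
            · push_cast; omega)]
    rw [List.append_assoc]
    congr 1
    simp only [List.singleton_append]
    congr 1
    apply List.map_congr_left
    intro i hi
    exact pvGetD_append_left s0 [PySem.List.pyGetD s0 (g a) []] (g i)
      (hb i (List.mem_cons_of_mem _ hi)).1 (hb i (List.mem_cons_of_mem _ hi)).2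

theorem pvGetD_map_range (f : Nat → List Int) (m j : Nat) (hj : j < m) :
    PySem.List.pyGetD ((List.range m).map f) ((j : Nat) : Int) [] = f j := by
  rw [PySem.List.pyGetD_natCast]
  rw [List.getD_eq_getElem?_getD]
  simp [hj]

theorem pvLastState (pbt : List (Int × List (Int × Int))) (pnl : List (List Int)) (tts : List (List (List Int × Int))) (init : List Int) (t : Nat) :
    PySem.List.pyGetD ((List.range (t + 1)).map (pvStateAt pbt pnl tts init)) (-1) []
      = pvStateAt pbt pnl tts init t := by
  rw [List.range_succ, List.map_append]
  simp [PySem.List.pyGetD_neg_one_append_singleton]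

theorem pvChop (S : Nat → List Int) (t k : Nat) :
    (List.range (t + 1 + 1)).map S ++ (List.range k).map (fun i => S (t + 1 + 1 + i))
      = (List.range (t + 1)).map S ++ (List.range (k + 1)).map (fun i => S (t + 1 + i)) := by
  rw [List.range_succ (n := t + 1), List.map_append, List.append_assoc]
  congr 1
  rw [List.range_succ_eq_map (n := k)]
  simp only [List.map_cons, List.map_nil, List.map_map, List.singleton_append, Nat.add_zero]
  congr 1
  apply List.map_congr_left
  intro i _
  simp only [Function.comp_apply]
  congr 1
  omega

-- appending the next computed state extends the mapped range
theorem pvSnoc (pbt : List (Int × List (Int × Int))) (pnl : List (List Int)) (tts : List (List (List Int × Int))) (init : List Int) (t : Nat) :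
    (List.range (t + 1)).map (pvStateAt pbt pnl tts init)
        ++ [pvStepBt pbt pnl tts ((t : Int) + 1) (pvStateAt pbt pnl tts init t)]
      = (List.range (t + 1 + 1)).map (pvStateAt pbt pnl tts init) := by
  rw [List.range_succ (n := t + 1), List.map_append]
  congr 1

-- B's while loop follows the trajectory of pvStateAt
theorem pvLoopB (pbt : List (Int × List (Int × Int))) (pnl : List (List Int)) (tts : List (List (List Int × Int))) (init : List Int) (n_steps last_pert : Int)
    (LP : ∀ u : Int, last_pert < u → pvLookup pbt u = none) :
    ∀ (k : Nat) (t : Nat) (seen : List (List Int × Int)),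
      (n_steps - (t : Int)).toNat = k →
      (∀ kv ∈ seen, ∃ s : Nat, kv.2 = (s : Int) ∧ s < t ∧ last_pert < (s : Int) + 1 ∧
        kv.1 = pvStateAt pbt pnl tts init s) →
      pvWhileC pbt pnl tts n_steps last_pert
        ((List.range (t + 1)).map (pvStateAt pbt pnl tts init)) seen (t : Int)
      = (List.range (t + 1)).map (pvStateAt pbt pnl tts init)
          ++ (List.range k).map (fun i => pvStateAt pbt pnl tts init (t + 1 + i)) := by
  intro k
  induction k with
  | zero =>
    intro t seen hk _
    rw [pvWhileC, dif_neg (by omega)]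
    simp
  | succ k ih =>
    intro t seen hk hseen
    rw [pvWhileC, dif_pos (by omega)]
    simp only [pvLastState]
    set S := pvStateAt pbt pnl tts init with hS
    by_cases hlp : last_pert < (t : Int) + 1
    · rw [if_pos hlp]
      rcases hlk : pvLookup seen (S t) with _ | start
      · -- record and recurse
        show pvWhileC pbt pnl tts n_steps last_pert
            ((List.range (t + 1)).map S ++ [pvStepBt pbt pnl tts ((t : Int) + 1) (S t)])
            (seen ++ [(S t, (t : Int))]) ((t : Int) + 1)
          = _
        rw [hS, pvSnoc pbt pnl tts init t, ← hS,
          show ((t : Int) + 1) = (((t + 1 : Nat)) : Int) by push_cast; ring]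
        rw [ih (t + 1) (seen ++ [(S t, (t : Int))]) (by push_cast; omega)
            (by intro kv hkv
                rcases List.mem_append.mp hkv with h | h
                · obtain ⟨s, h1, h2, h3, h4⟩ := hseen kv h
                  exact ⟨s, h1, by omega, h3, h4⟩
                · simp only [List.mem_singleton] at h
                  subst h
                  exact ⟨t, rfl, by omega, hlp, rfl⟩)]
        exact pvChop S t k
      · -- cycle shortcut
        show (PySem.List.pyRange 0 (n_steps - (t : Int)) 1).foldl
            (fun st i => st ++ [PySem.List.pyGetD st (start + 1 + PySem.Int.mod i ((t : Int) - start)) []])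
            ((List.range (t + 1)).map S)
          = _
        have hmem := pvLookup_mem seen (S t) start hlk
        obtain ⟨sN, hs1, hs2, hs3, hs4⟩ := hseen (S t, start) hmem
        simp only at hs1 hs4
        subst hs1
        have hp : 0 < t - sN := by omega
        set p : Nat := t - sN with hpdef
        have hpt : sN + p = t := by omega
        set f : List Int → List Int := pvStepB pnl tts [] with hf
        have hiter : ∀ j : Nat, S (sN + j) = f^[j] (S sN) :=
          pvIterU pbt pnl tts init last_pert LP sN hs3
        have hper : f^[p] (S sN) = S sN := by
          rw [← hiter p, hpt, ← hs4]
        have hlen : (((List.range (t + 1)).map S).length : Int) = (t : Int) + 1 := by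
          simp
        have hbnd : ∀ i ∈ PySem.List.pyRange 0 (n_steps - (t : Int)) 1,
            0 ≤ (sN : Int) + 1 + PySem.Int.mod i ((t : Int) - (sN : Int)) ∧
            (sN : Int) + 1 + PySem.Int.mod i ((t : Int) - (sN : Int))
              < (((List.range (t + 1)).map S).length : Int) := by
          intro i hi
          rw [PySem.List.mem_pyRange_one] at hi
          rw [PySem.Int.mod_eq_emod_of_pos (show (0:Int) < (t : Int) - (sN : Int) by omega)]
          have h1 : 0 ≤ i % ((t : Int) - (sN : Int)) := Int.emod_nonneg i (by omega)
          have h2 : i % ((t : Int) - (sN : Int)) < (t : Int) - (sN : Int) :=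
            Int.emod_lt_of_pos i (by omega)
          rw [hlen]
          omega
        rw [pvFoldCopy (fun i => (sN : Int) + 1 + PySem.Int.mod i ((t : Int) - (sN : Int)))
          (PySem.List.pyRange 0 (n_steps - (t : Int)) 1) ((List.range (t + 1)).map S) hbnd]
        congr 1
        rw [PySem.List.pyRange_one 0 (n_steps - (t : Int)), List.map_map]
        have hkn : (n_steps - (t : Int) - 0).toNat = k + 1 := by omega
        rw [hkn]
        apply List.map_congr_left
        intro j hj
        simp only [List.mem_range] at hj
        show PySem.List.pyGetD ((List.range (t + 1)).map S)
            ((sN : Int) + 1 + PySem.Int.mod (0 + (j : Int)) ((t : Int) - (sN : Int))) []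
          = S (t + 1 + j)
        rw [zero_add, PySem.Int.mod_eq_emod_of_pos (show (0:Int) < (t : Int) - (sN : Int) by omega),
          show (t : Int) - (sN : Int) = ((p : Nat) : Int) by omega,
          show (j : Int) % ((p : Nat) : Int) = ((j % p : Nat) : Int) by push_cast; ring,
          show (sN : Int) + 1 + ((j % p : Nat) : Int) = (((sN + 1 + j % p : Nat)) : Int) by
            push_cast; ring]
        have hjp : j % p < p := Nat.mod_lt j hp
        rw [pvGetD_map_range S (t + 1) (sN + 1 + j % p) (by omega)]
        rw [show sN + 1 + j % p = sN + (1 + j % p) by omega, hiter (1 + j % p),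
          show t + 1 + j = sN + (p + 1 + j) by omega, hiter (p + 1 + j),
          pvIterMod f (S sN) p hp hper (1 + j % p),
          pvIterMod f (S sN) p hp hper (p + 1 + j)]
        congr 1
        rw [show p + 1 + j = p + (1 + j) by omega, Nat.add_mod_left p (1 + j)]
        conv_lhs => rw [Nat.add_mod]
        conv_rhs => rw [Nat.add_mod]
        simp [Nat.mod_mod_of_dvd]
    · rw [if_neg hlp]
      show pvWhileC pbt pnl tts n_steps last_pert
          ((List.range (t + 1)).map S ++ [pvStepBt pbt pnl tts ((t : Int) + 1) (S t)])
          seen ((t : Int) + 1)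
        = _
      rw [hS, pvSnoc pbt pnl tts init t, ← hS,
        show ((t : Int) + 1) = (((t + 1 : Nat)) : Int) by push_cast; ring]
      rw [ih (t + 1) seen (by push_cast; omega)
          (by intro kv hkv
              obtain ⟨s, h1, h2, h3, h4⟩ := hseen kv hkv
              exact ⟨s, h1, by omega, h3, h4⟩)]
      exact pvChop S t k

theorem pvMaxBound (pbt : List (Int × List (Int × Int))) (u : Int)
    (hu : PySem.List.maxD (pbt.map Prod.fst) (fun x => x) 0 < u) :
    pvLookup pbt u = none := by
  apply pvLookup_not_mem
  intro hmem
  unfold PySem.List.maxD at hu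
  rcases hmq : PySem.List.max? (pbt.map Prod.fst) (fun x => x) with _ | m
  · rw [PySem.List.max?_eq_none_iff] at hmq
    rw [hmq] at hmem
    simp at hmem
  · rw [hmq] at hu
    simp only [Option.getD_some] at hu
    have := PySem.List.max?_isMax hmq u hmem
    simp at this
    omega

-- ===== VERDICT (by name: the statement is the Claim_ definition above) =====
theorem simulate_n_steps_spec : Claim_equal_simulate_n_steps := by
  unfold Claim_equal_simulate_n_steps
  intro initial_state perturbed_nodes_by_t predecessor_node_lists truth_tables n_steps _hdom hpre
  unfold Spec_simulate_n_steps simulate_n_steps simulate_n_steps_alt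
  have P : ∀ td ∈ perturbed_nodes_by_t, 1 ≤ td.1 → td.1 ≤ n_steps →
      ((td.2.map Prod.fst).Nodup ∧
       ∀ nv ∈ td.2, 0 ≤ nv.1 ∧ nv.1 < (initial_state.length : Int)) := by
    intro td htd h1 h2
    by_cases hn : 0 < n_steps
    · obtain ⟨_, _, _, _, _, _, hP⟩ := hpre hn
      obtain ⟨hnd, hall⟩ := hP td htd h1 h2
      exact ⟨hnd, fun nv hnv => (hall nv hnv).1⟩
    · omega
  have hA := pvFoldA perturbed_nodes_by_t predecessor_node_lists truth_tables initial_state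
    n_steps P n_steps.toNat 0 [initial_state] (by simp)
  have hB := pvLoopB perturbed_nodes_by_t predecessor_node_lists truth_tables initial_state
    n_steps (PySem.List.maxD (perturbed_nodes_by_t.map Prod.fst) (fun x => x) 0)
    (pvMaxBound perturbed_nodes_by_t) n_steps.toNat 0 [] (by simp) (by simp)
  simp only [Nat.cast_zero] at hA hB
  have hinit : (List.range (0 + 1)).map
      (pvStateAt perturbed_nodes_by_t predecessor_node_lists truth_tables initial_state)
    = [initial_state] := by simp [pvStateAt]
  rw [hinit] at hB
  show (_ : List (List Int) × List Int).1 = _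
  rw [hB]
  exact hA
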